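-- pv_equiv track=rewrite | github.com/seanco-hash/xl_parser | general_xl_parser.py | parse_maxlinker_uniport
-- ===== SOURCE A (Python) =====
-- def parse_maxlinker_uniport(line):
--     uniports = line.split(';')
--     sliced_uniports = [item.split('-')[0] for item in uniports]
--     i = 1
--     while i < len(sliced_uniports):
--         if sliced_uniports[0] != sliced_uniports[i]:
--             return ""
--         i += 1
--     return sliced_uniports[0]
-- ===== SOURCE B (Python) =====
-- def parse_maxlinker_uniport(line):
--     parts = {item.split('-')[0] for item in line.split(';')}
--     return next(iter(parts)) if len(parts) == 1 else ""
-- ===== Notes on version B (the rewrite author's own statement) =====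
-- stated objective: simpler
-- what changed: Replaces the index-based while loop comparing each sliced prefix against the first with a set comprehension of the distinct prefixes, returning the single element when exactly one distinct value exists.
import Mathlib
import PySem

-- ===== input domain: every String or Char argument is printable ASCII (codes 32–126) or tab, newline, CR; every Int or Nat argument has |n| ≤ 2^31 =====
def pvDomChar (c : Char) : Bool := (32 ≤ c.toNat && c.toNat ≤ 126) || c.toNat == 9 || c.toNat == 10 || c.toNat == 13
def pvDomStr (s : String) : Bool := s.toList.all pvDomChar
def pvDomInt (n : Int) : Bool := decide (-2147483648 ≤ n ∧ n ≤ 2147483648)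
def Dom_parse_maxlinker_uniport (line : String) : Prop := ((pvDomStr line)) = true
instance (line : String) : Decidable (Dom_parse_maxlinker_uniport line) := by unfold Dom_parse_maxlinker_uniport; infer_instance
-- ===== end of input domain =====

-- B replaces A's index-based while loop (first-vs-i comparison) with a set of the
-- distinct sliced prefixes, returning the single element when exactly one exists (simpler).


-- ===== PORT A =====
-- item.split('-')[0]: split with a non-empty separator always returns a non-empty list,
-- so the [0] index is exactly the head (never an IndexError).
-- the separator is never empty, so split? is always 'some'; '.getD []' just unwraps it
def pvSplit (s sep : String) : List String := (PySem.Str.split? s sep).getD []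

def pvSliceHead (item : String) : String := (pvSplit item "-").headD ""

-- the while loop 'i = 1; while i < len: if sliced[0] != sliced[i]: return ""; i += 1'
-- as structural recursion over the elements after the first, carrying sliced[0]
def pvWhileA (h : String) : List String → String
  | [] => h
  | x :: rest => if h ≠ x then "" else pvWhileA h rest

def parse_maxlinker_uniport (line : String) : String :=
  let uniports := pvSplit line ";"
  let sliced := uniports.map pvSliceHead
  match sliced with
  | [] => ""            -- unreachable: split never returns an empty list
  | h :: t => pvWhileA h t

-- ===== PORT B =====
def parse_maxlinker_uniport_alt (line : String) : String :=
  let parts : PySem.Set String :=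
    PySem.Set.ofList ((pvSplit line ";").map (fun item => (pvSplit item "-").headD ""))
  if parts.length = 1 then parts.headD "" else ""

-- ===== PRECONDITION & SPEC =====
def Spec_parse_maxlinker_uniport (line : String) (out : String) : Prop := out = parse_maxlinker_uniport_alt line
instance (line : String) (out : String) : Decidable (Spec_parse_maxlinker_uniport line out) := by unfold Spec_parse_maxlinker_uniport; infer_instance

-- ===== CLAIM (what is proved, stated in full; the proofs are below) =====
def Claim_equal_parse_maxlinker_uniport : Prop := ∀ (line : String), Dom_parse_maxlinker_uniport line → Spec_parse_maxlinker_uniport line (parse_maxlinker_uniport line)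

-- ===== LEMMAS AND PROOFS =====

-- A's loop returns h iff every later element equals h, else ""
theorem pvWhileA_eq (t : List String) (h : String) :
    pvWhileA h t = (if t.all (fun x => x = h) then h else "") := by
  induction t with
  | nil => simp [pvWhileA]
  | cons x rest ih =>
    by_cases hx : h = x
    · subst hx; simp [pvWhileA, ih]
    · simp [pvWhileA, hx, Ne.symm hx]

theorem foldl_add_all (t : List String) (h : String)
    (hall : ∀ x ∈ t, x = h) : t.foldl PySem.Set.add [h] = [h] := by
  induction t with
  | nil => rfl
  | cons x rest ih =>
    have hx : x = h := hall x (by simp)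
    subst hx
    have : PySem.Set.add [x] x = [x] := by simp [PySem.Set.add]
    simpa [this] using ih (fun y hy => hall y (by simp [hy]))

theorem mem_foldl_add (t : List String) (s : List String) (x : String) :
    x ∈ s ∨ x ∈ t → x ∈ t.foldl PySem.Set.add s := by
  induction t generalizing s with
  | nil => intro hx; simpa using hx
  | cons y rest ih =>
    intro hx
    simp only [List.foldl_cons]
    apply ih
    rcases hx with hs | ht
    · exact Or.inl ((PySem.Set.mem_add _ _ _).mpr (Or.inl hs))
    · rcases List.mem_cons.mp ht with rfl | hr
      · exact Or.inl ((PySem.Set.mem_add _ _ _).mpr (Or.inr rfl))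
      · exact Or.inr hr

theorem two_mem_length (l : List String) (a b : String)
    (ha : a ∈ l) (hb : b ∈ l) (hne : a ≠ b) : l.length ≠ 1 := by
  intro hlen
  match l, hlen with
  | [c], _ =>
    simp at ha hb
    exact hne (ha.trans hb.symm)

theorem pv_core (xs : List String) :
    (match xs with | [] => "" | h :: t => pvWhileA h t) =
      (if (PySem.Set.ofList xs).length = 1 then (PySem.Set.ofList xs).headD "" else "") := by
  match xs with
  | [] => rfl
  | h :: t =>
    simp only [PySem.Set.ofList_eq_foldl]
    rw [pvWhileA_eq]
    by_cases hall : ∀ x ∈ t, x = h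
    · have h1 : t.foldl PySem.Set.add [h] = [h] := foldl_add_all t h hall
      have h2 : PySem.Set.add [] h = [h] := rfl
      have hAll : t.all (fun x => x = h) = true := by
        simp only [List.all_eq_true, decide_eq_true_eq]; exact hall
      simp [List.foldl_cons, h1, hAll]
    · rw [not_forall] at hall
      simp only [not_forall, exists_prop] at hall
      obtain ⟨x, hx, hxh⟩ := hall
      have hxmem : x ∈ (h :: t).foldl PySem.Set.add [] := by
        apply mem_foldl_add; exact Or.inr (by simp [hx])
      have hhmem : h ∈ (h :: t).foldl PySem.Set.add [] := by
        apply mem_foldl_add; exact Or.inr (by simp)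
      have hlen := two_mem_length _ x h hxmem hhmem hxh
      have hnot : ¬ (t.all (fun x => x = h) = true) := by
        simp only [List.all_eq_true, decide_eq_true_eq]
        rw [not_forall]; exact ⟨x, by simp [hx, hxh]⟩
      rw [if_neg hlen, if_neg (by simpa using hnot)]

theorem parse_maxlinker_uniport_eq_alt (line : String) :
    parse_maxlinker_uniport line = parse_maxlinker_uniport_alt line := by
  exact pv_core ((pvSplit line ";").map (fun item => (pvSplit item "-").headD ""))

-- ===== VERDICT (by name: the statement is the Claim_ definition above) =====
theorem parse_maxlinker_uniport_spec : Claim_equal_parse_maxlinker_uniport := by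
  intro line _
  exact parse_maxlinker_uniport_eq_alt line
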